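-- pv_equiv track=rewrite | github.com/EpiEvoSoftware/original_pipeline | e3SIM/seed_host_matcher.py | _sort_node_by_edge
-- ===== SOURCE A (Python) =====
-- def _sort_node_by_edge(dict_edges_node):
-- 	"""
-- 	Returns a list of nodes reversely sorted by their degress (list[int])
-- 	and a list of their corresponding degreses (list[int]).
--
-- 	Parameters:
-- 		dict_edges_node (dict[int, list[int]]): A dictionary with degrees
-- 		as keys and a list of notes of corresponding degrees as values,
-- 	"""
-- 	nodes_sorted = []
-- 	degree_sorted = []
-- 	for degree in sorted(dict_edges_node.keys(), reverse = True):
-- 		nodes = dict_edges_node[degree]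
-- 		nodes_sorted.extend(nodes)
-- 		degree_sorted.extend([degree]*len(nodes))
-- 	# degree_sorted is not used anywhere in the pipeline for now;
-- 	# we can delete it if we decide this is unnecessary
-- 	return nodes_sorted, degree_sorted
-- ===== SOURCE B (Python) =====
-- def _sort_node_by_edge(dict_edges_node):
--     # Flatten the grouped dict into (degree, node) pairs once, stable-sort all
--     # pairs by degree descending, then unzip into the two result lists.
--     pairs = [(degree, node) for degree, nodes in dict_edges_node.items() for node in nodes]
--     pairs.sort(key=lambda p: -p[0])
--     nodes_sorted = [node for _, node in pairs]
--     degree_sorted = [degree for degree, _ in pairs]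
--     return nodes_sorted, degree_sorted
-- ===== Notes on version B (the rewrite author's own statement) =====
-- stated objective: alternative
-- what changed: Instead of sorting the degree keys descending and extending two accumulator lists from per-degree dict lookups, B flattens the dict into one list of (degree, node) pairs, applies a single stable sort keyed on -degree, and unzips the sorted pairs.
import Mathlib
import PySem

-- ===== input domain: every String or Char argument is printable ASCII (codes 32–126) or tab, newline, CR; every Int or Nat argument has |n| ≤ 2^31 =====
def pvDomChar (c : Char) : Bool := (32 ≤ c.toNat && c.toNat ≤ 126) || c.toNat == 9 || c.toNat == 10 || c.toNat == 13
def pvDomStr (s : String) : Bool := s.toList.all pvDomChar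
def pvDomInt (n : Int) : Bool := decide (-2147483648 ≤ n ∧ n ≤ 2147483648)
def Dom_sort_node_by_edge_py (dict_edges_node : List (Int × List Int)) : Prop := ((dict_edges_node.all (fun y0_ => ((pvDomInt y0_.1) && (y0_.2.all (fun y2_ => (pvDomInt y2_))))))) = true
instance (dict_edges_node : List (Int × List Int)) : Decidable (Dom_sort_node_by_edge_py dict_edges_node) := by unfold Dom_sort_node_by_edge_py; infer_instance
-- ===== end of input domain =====

-- B replaces A's sort-the-keys-then-extend-per-group loop by one stable sort of all
-- flattened (degree, node) pairs keyed on -degree, then unzips; a genuinely different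
-- decomposition of the same task (objective: alternative).


-- ===== PORT A =====
-- dict[degree] is looked up with getD []: degree always comes from d.keys, so the
-- Python lookup never raises and the default is never taken (exact).
def sort_node_by_edge_py (dict_edges_node : List (Int × List Int)) : List Int × List Int :=
  let d := PySem.Dict.ofList dict_edges_node
  (PySem.List.sorted d.keys (fun x => x) true).foldl
    (fun acc degree =>
      let nodes := d.getD degree []
      (acc.1 ++ nodes, acc.2 ++ PySem.List.pyRepeat [degree] (nodes.length : Int)))
    ([], [])

-- ===== PORT B =====
def sort_node_by_edge_py_alt (dict_edges_node : List (Int × List Int)) : List Int × List Int :=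
  let pairs := (PySem.Dict.ofList dict_edges_node).items.flatMap
    (fun kv => kv.2.map (fun node => (kv.1, node)))
  let s := PySem.List.sorted pairs (fun p => -p.1) false
  (s.map (fun p => p.2), s.map (fun p => p.1))

-- ===== PRECONDITION & SPEC =====
def Spec_sort_node_by_edge_py (dict_edges_node : List (Int × List Int)) (out : List Int × List Int) : Prop := out = sort_node_by_edge_py_alt dict_edges_node
instance (dict_edges_node : List (Int × List Int)) (out : List Int × List Int) : Decidable (Spec_sort_node_by_edge_py dict_edges_node out) := by unfold Spec_sort_node_by_edge_py; infer_instance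

-- ===== CLAIM (what is proved, stated in full; the proofs are below) =====
def Claim_equal_sort_node_by_edge_py : Prop := ∀ (dict_edges_node : List (Int × List Int)), Dom_sort_node_by_edge_py dict_edges_node → Spec_sort_node_by_edge_py dict_edges_node (sort_node_by_edge_py dict_edges_node)

-- ===== LEMMAS AND PROOFS =====

-- insertBy (the step of PySem's stable insertion sort) preserves sortedness by key.
theorem pv_insertBy_pairwise {α : Type} (key : α → Int) (x : α) (ys : List α)
    (h : ys.Pairwise (fun a b => key a ≤ key b)) :
    (PySem.List.insertBy (fun a b => decide (key a < key b)) x ys).Pairwise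
      (fun a b => key a ≤ key b) := by
  induction ys with
  | nil => simp [PySem.List.insertBy]
  | cons y ys ih =>
    rw [List.pairwise_cons] at h
    obtain ⟨hy, hys⟩ := h
    by_cases hlt : key x < key y
    · simp only [PySem.List.insertBy, hlt, decide_true, if_true]
      refine List.pairwise_cons.2 ⟨?_, List.pairwise_cons.2 ⟨hy, hys⟩⟩
      intro b hb
      rcases List.mem_cons.1 hb with rfl | hb
      · exact le_of_lt hlt
      · exact le_trans (le_of_lt hlt) (hy b hb)
    · simp only [PySem.List.insertBy, hlt, decide_false]
      refine List.pairwise_cons.2 ⟨?_, ih hys⟩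
      intro b hb
      rcases (PySem.List.mem_insertBy _ x b ys).1 hb with rfl | hb
      · exact le_of_not_gt hlt
      · exact hy b hb

-- Stability at the level of one insertion: on a sorted list, the elements of a given
-- key value v are exactly the old ones followed by x when key x = v.
theorem pv_insertBy_filter {α : Type} (key : α → Int) (v : Int) (x : α) (ys : List α)
    (h : ys.Pairwise (fun a b => key a ≤ key b)) :
    (PySem.List.insertBy (fun a b => decide (key a < key b)) x ys).filter
        (fun a => key a == v)
      = ys.filter (fun a => key a == v) ++ (if key x == v then [x] else []) := by
  induction ys with
  | nil =>
    by_cases hxv : key x == v <;> simp [PySem.List.insertBy, hxv]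
  | cons y ys ih =>
    rw [List.pairwise_cons] at h
    obtain ⟨hy, hys⟩ := h
    by_cases hlt : key x < key y
    · simp only [PySem.List.insertBy, hlt, decide_true, if_true]
      by_cases hxv : key x == v
      · -- no element of y::ys has key v, since all keys ≥ key y > key x = v
        have hv : key x = v := by exact_mod_cast of_decide_eq_true hxv
        have : (y :: ys).filter (fun a => key a == v) = [] := by
          rw [List.filter_eq_nil_iff]
          intro a ha
          rcases List.mem_cons.1 ha with rfl | ha
          · simp only [beq_iff_eq]; omega
          · have := hy a ha; simp only [beq_iff_eq]; omega
        simp [hxv, this]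
      · simp [List.filter_cons, hxv]
    · simp only [PySem.List.insertBy, hlt, decide_false]
      by_cases hyv : key y == v <;> simp [hyv, ih hys]

theorem pv_foldl_insert_filter {α : Type} (key : α → Int) (v : Int) (xs : List α)
    (acc : List α) (h : acc.Pairwise (fun a b => key a ≤ key b)) :
    ((xs.foldl (fun acc x => PySem.List.insertBy (fun a b => decide (key a < key b)) x acc)
          acc).filter (fun a => key a == v))
      = acc.filter (fun a => key a == v) ++ xs.filter (fun a => key a == v) := by
  induction xs generalizing acc with
  | nil => simp
  | cons x xs ih =>
    rw [List.foldl_cons, ih _ (pv_insertBy_pairwise key x acc h),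
      pv_insertBy_filter key v x acc h]
    by_cases hxv : key x == v <;> simp [hxv]

-- STABILITY of PySem's sort: per key value, sorted keeps the input order.
theorem pv_sorted_filter {α : Type} (key : α → Int) (v : Int) (xs : List α) :
    (PySem.List.sorted xs key).filter (fun a => key a == v)
      = xs.filter (fun a => key a == v) := by
  rw [PySem.List.sorted_eq_foldl_insertBy, pv_foldl_insert_filter key v xs [] (by simp)]
  simp

-- UNIQUENESS: a key-sorted list is determined by its per-key-value filters.
theorem pv_eq_of_pairwise_of_filter {α : Type} (key : α → Int) :
    ∀ (l₁ l₂ : List α), l₁.Pairwise (fun a b => key a ≤ key b) →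
      l₂.Pairwise (fun a b => key a ≤ key b) →
      (∀ v, l₁.filter (fun a => key a == v) = l₂.filter (fun a => key a == v)) →
      l₁ = l₂ := by
  intro l₁
  induction l₁ with
  | nil =>
    intro l₂ _ _ hf
    cases l₂ with
    | nil => rfl
    | cons b s =>
      have := hf (key b)
      simp at this
  | cons a t ih =>
    intro l₂ h₁ h₂ hf
    cases l₂ with
    | nil =>
      have := hf (key a)
      simp at this
    | cons b s =>
      rw [List.pairwise_cons] at h₁ h₂
      have ha : a ∈ b :: s := by
        refine List.mem_of_mem_filter (p := fun x => key x == key a) ?_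
        rw [← hf (key a)]; simp
      have hb : b ∈ a :: t := by
        refine List.mem_of_mem_filter (p := fun x => key x == key b) ?_
        rw [hf (key b)]; simp
      have hab : key a = key b := by
        have h1 : key b ≤ key a := by
          rcases List.mem_cons.1 ha with rfl | ha'
          · exact le_refl _
          · exact h₂.1 a ha'
        have h2 : key a ≤ key b := by
          rcases List.mem_cons.1 hb with rfl | hb'
          · exact le_refl _
          · exact h₁.1 b hb'
        omega
      have hab' : a = b := by
        have h1 := hf (key a)
        simp only [List.filter_cons, show (key a == key a) = true by simp,
          show (key b == key a) = true by simp [hab], if_true] at h1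
        exact (List.cons_eq_cons.mp h1).1
      subst hab'
      have htf : ∀ v, t.filter (fun x => key x == v) = s.filter (fun x => key x == v) := by
        intro v
        have hv2 := hf v
        by_cases hv : (key a == v) = true
        · simp only [List.filter_cons, hv, if_true] at hv2
          exact (List.cons_eq_cons.mp hv2).2
        · simp only [List.filter_cons, hv, if_false] at hv2
          exact hv2
      rw [ih s h₁.2 h₂.2 htf]

-- Flattening key-descending groups whose elements carry their group key is
-- ascending in -fst.
theorem pv_flatMap_pairwise (L : List Int) (f : Int → List (Int × Int))
    (hL : L.Pairwise (fun a b => b ≤ a)) (hf : ∀ k p, p ∈ f k → p.1 = k) :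
    (L.flatMap f).Pairwise (fun p q => (-p.1 : Int) ≤ -q.1) := by
  induction L with
  | nil => simp
  | cons k L ih =>
    rw [List.pairwise_cons] at hL
    rw [List.flatMap_cons]
    refine List.pairwise_append.2 ⟨?_, ih hL.2, ?_⟩
    · refine List.pairwise_of_forall_mem_list ?_
      intro p hp q hq
      rw [hf k p hp, hf k q hq]
    · intro p hp q hq
      obtain ⟨k', hk', hq'⟩ := List.mem_flatMap.1 hq
      rw [hf k p hp, hf k' q hq']
      have := hL.1 k' hk'
      omega

-- Over a duplicate-free key list, a flatMap that is nonempty on at most the key w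
-- reduces to the single group of w.
theorem pv_flatMap_if (f : Int → List (Int × Int)) (w : Int) :
    ∀ L : List Int, L.Nodup →
      L.flatMap (fun k => if k = w then f k else []) = if w ∈ L then f w else [] := by
  intro L
  induction L with
  | nil => simp
  | cons k L ih =>
    intro hnd
    rw [List.nodup_cons] at hnd
    rw [List.flatMap_cons, ih hnd.2]
    by_cases hkw : k = w
    · subst hkw
      simp [hnd.1]
    · simp [hkw, List.mem_cons, Ne.symm hkw]

-- ===== VERDICT (by name: the statement is the Claim_ definition above) =====
theorem sort_node_by_edge_py_spec : Claim_equal_sort_node_by_edge_py := by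
  intro input _
  unfold Spec_sort_node_by_edge_py sort_node_by_edge_py sort_node_by_edge_py_alt
  have hnd : (PySem.Dict.ofList input).keys.Nodup := PySem.Dict.nodup_keys_ofList input
  set d := PySem.Dict.ofList input with hdd
  set L := PySem.List.sorted d.keys (fun x => x) true with hLdef
  set bl : Int → List (Int × Int) := fun k => (d.getD k []).map (fun n => (k, n)) with hbl
  have hLnd : L.Nodup := (PySem.List.sorted_perm d.keys (fun x => x) true).nodup_iff.mpr hnd
  have hpairs : d.items.flatMap (fun kv => kv.2.map (fun node => (kv.1, node)))
      = d.keys.flatMap bl := by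
    rw [PySem.Dict.items_eq_map_keys d hnd [], List.flatMap_map]
  have hblf : ∀ v k, (bl k).filter (fun p => -p.1 == v) = if k = -v then bl k else [] := by
    intro v k
    rw [hbl, List.filter_map]
    have hc : ((fun p : Int × Int => -p.1 == v) ∘ (fun n => (k, n))) = fun _ => (-k == v) := rfl
    rw [hc]
    by_cases hk : k = -v
    · simp [hk]
    · have ht : (-k == v) = false := by simp; omega
      simp [hk, ht]
  have hflat : ∀ v (M : List Int), M.Nodup →
      (M.flatMap bl).filter (fun p => -p.1 == v) = (if -v ∈ M then bl (-v) else []) := by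
    intro v M hM
    rw [List.filter_flatMap]
    have hc : (fun k => (bl k).filter (fun p => -p.1 == v))
        = fun k => if k = -v then bl k else [] := funext (hblf v)
    rw [hc, pv_flatMap_if bl (-v) M hM]
  -- the stable sort of the flattened pairs equals the concatenation of groups
  have hS : PySem.List.sorted (d.items.flatMap (fun kv => kv.2.map (fun node => (kv.1, node))))
        (fun p => -p.1) false
      = L.flatMap bl := by
    apply pv_eq_of_pairwise_of_filter (fun p : Int × Int => -p.1)
    · exact PySem.List.sorted_pairwise _ _
    · exact pv_flatMap_pairwise L bl (PySem.List.sorted_pairwise_rev d.keys (fun x => x))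
        (by intro k p hp; rw [hbl] at hp; simp at hp; obtain ⟨n, _, rfl⟩ := hp; rfl)
    · intro v
      rw [pv_sorted_filter (fun p : Int × Int => -p.1) v, hpairs, hflat v d.keys hnd,
        hflat v L hLnd]
      have hmem : -v ∈ L ↔ -v ∈ d.keys := PySem.List.mem_sorted d.keys (fun x => x) true (-v)
      by_cases hv : -v ∈ d.keys
      · rw [if_pos hv, if_pos (hmem.mpr hv)]
      · rw [if_neg hv, if_neg (fun h => hv (hmem.mp h))]
  show L.foldl
      (fun acc degree =>
        (acc.1 ++ d.getD degree [],
         acc.2 ++ PySem.List.pyRepeat [degree] ((d.getD degree []).length : Int)))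
      ([], [])
    = ((PySem.List.sorted (d.items.flatMap (fun kv => kv.2.map (fun node => (kv.1, node))))
          (fun p => -p.1) false).map (fun p => p.2),
       (PySem.List.sorted (d.items.flatMap (fun kv => kv.2.map (fun node => (kv.1, node))))
          (fun p => -p.1) false).map (fun p => p.1))
  rw [hS]
  rw [PySem.List.foldl_prod_mk (f := fun acc k => acc ++ d.getD k [])
    (g := fun acc k => acc ++ PySem.List.pyRepeat [k] ((d.getD k []).length : Int))]
  have hcomp : ∀ (f g : Int → List Int), (∀ k, f k = g k) → List.flatMap f L = List.flatMap g L :=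
    fun f g h => by rw [funext h]
  refine Prod.ext ?_ ?_
  · show List.foldl (fun acc k => acc ++ d.getD k []) [] L
        = List.map (fun p => p.2) (List.flatMap bl L)
    rw [PySem.List.foldl_append_eq_flatMap, List.nil_append, List.map_flatMap]
    exact hcomp _ _ (fun k => by rw [hbl]; simp)
  · show List.foldl (fun acc k => acc ++ PySem.List.pyRepeat [k] ((d.getD k []).length : Int)) [] L
        = List.map (fun p => p.1) (List.flatMap bl L)
    rw [PySem.List.foldl_append_eq_flatMap, List.nil_append, List.map_flatMap]
    exact hcomp _ _ (fun k => by rw [hbl]; simp [PySem.List.pyRepeat_singleton])
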